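-- pv_equiv track=rewrite | github.com/scydereal/simbl | transpiler.py | makeAnnotation
-- ===== SOURCE A (Python) =====
-- def makeAnnotation(wordArray, separator):
-- 	CHARS_THRESHOLD = 30
-- 	result = ""
-- 	curLineLen = 0
-- 	for word in wordArray:
-- 		curLineLen += len(word)
-- 		result += word + " "
-- 		if curLineLen > CHARS_THRESHOLD:
-- 			result += separator
-- 			curLineLen = 0
-- 	return result
-- ===== SOURCE B (Python) =====
-- def makeAnnotation(wordArray, separator):
--     # Pass 1: group words; a group closes ("triggered") when the running
--     # word-length total exceeds 30, and the total resets.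
--     groups = []
--     cur = []
--     n = 0
--     for w in wordArray:
--         cur.append(w)
--         n += len(w)
--         if n > 30:
--             groups.append((cur, True))
--             cur = []
--             n = 0
--     if cur:
--         groups.append((cur, False))
--     # Pass 2: render each group, separator appended iff triggered.
--     out = []
--     for grp, trig in groups:
--         out.append(''.join(w + ' ' for w in grp))
--         if trig:
--             out.append(separator)
--     return ''.join(out)
-- ===== Notes on version B (the rewrite author's own statement) =====
-- stated objective: alternative
-- what changed: Replaces A's single loop that interleaves string building with threshold bookkeeping by a two-phase algorithm: first group the words into (group, triggered) chunks by running word-length, then render each group and append the separator only for triggered groups.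
import Mathlib
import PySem

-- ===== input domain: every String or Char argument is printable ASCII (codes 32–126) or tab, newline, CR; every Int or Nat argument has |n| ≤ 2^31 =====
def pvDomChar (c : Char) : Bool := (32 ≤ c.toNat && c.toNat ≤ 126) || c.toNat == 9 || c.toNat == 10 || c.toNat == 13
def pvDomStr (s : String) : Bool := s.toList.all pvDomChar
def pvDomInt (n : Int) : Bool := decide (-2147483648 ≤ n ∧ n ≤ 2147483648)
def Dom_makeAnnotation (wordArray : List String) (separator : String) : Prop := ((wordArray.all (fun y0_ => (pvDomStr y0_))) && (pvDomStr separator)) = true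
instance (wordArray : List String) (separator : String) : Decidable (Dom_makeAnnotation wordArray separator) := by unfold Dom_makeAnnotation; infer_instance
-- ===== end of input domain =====

-- B replaces A's single bookkeeping loop by two phases (group words into triggered chunks, then render); alternative decomposition, same cost.


-- ===== PORT A =====
-- A: one loop over the words, state (result, curLineLen).
def makeAnnotation (wordArray : List String) (separator : String) : String :=
  (wordArray.foldl
    (fun (st : String × Int) word =>
      let curLineLen := st.2 + PySem.Str.len word
      let result := st.1 ++ word ++ " "
      if curLineLen > 30 then (result ++ separator, 0) else (result, curLineLen))
    ("", 0)).1

-- ===== PORT B =====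
-- Pass 1 of Source B: group words into (group, triggered) chunks by running word-length.
def bGroups (ws : List String) (cur : List String) (n : Int) : List (List String × Bool) :=
  match ws with
  | [] => if cur ≠ [] then [(cur, false)] else []
  | w :: rest =>
      let cur' := cur ++ [w]
      let n' := n + PySem.Str.len w
      if n' > 30 then (cur', true) :: bGroups rest [] 0
      else bGroups rest cur' n'

-- ''.join(w + ' ' for w in grp)
def bRenderGroup (grp : List String) : String :=
  String.join (grp.map (fun w => w ++ " "))

def makeAnnotation_alt (wordArray : List String) (separator : String) : String :=
  let groups := bGroups wordArray [] 0
  let out := groups.foldl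
    (fun (acc : List String) g =>
      (acc ++ [bRenderGroup g.1]) ++ (if g.2 then [separator] else [])) []
  String.join out

-- ===== PRECONDITION & SPEC =====
def Spec_makeAnnotation (wordArray : List String) (separator : String) (out : String) : Prop := out = makeAnnotation_alt wordArray separator
instance (wordArray : List String) (separator : String) (out : String) : Decidable (Spec_makeAnnotation wordArray separator out) := by unfold Spec_makeAnnotation; infer_instance

-- ===== CLAIM (what is proved, stated in full; the proofs are below) =====
def Claim_equal_makeAnnotation : Prop := ∀ (wordArray : List String) (separator : String), Dom_makeAnnotation wordArray separator → Spec_makeAnnotation wordArray separator (makeAnnotation wordArray separator)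

-- ===== LEMMAS AND PROOFS =====

-- render a whole group list recursively (proof-side view of pass 2)
def renderAll (sep : String) : List (List String × Bool) → String
  | [] => ""
  | g :: gs => bRenderGroup g.1 ++ (if g.2 then sep else "") ++ renderAll sep gs

theorem renderGroup_append (cur : List String) (w : String) :
    bRenderGroup (cur ++ [w]) = bRenderGroup cur ++ (w ++ " ") := by
  simp [bRenderGroup, String.join]

-- pass 2 as a foldl (the shape of the port) equals renderAll
theorem foldl_out_eq (sep : String) (gs : List (List String × Bool)) (acc : List String) :
    String.join (gs.foldl
      (fun (a : List String) g => (a ++ [bRenderGroup g.1]) ++ (if g.2 then [sep] else [])) acc)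
      = String.join acc ++ renderAll sep gs := by
  induction gs generalizing acc with
  | nil => simp [renderAll]
  | cons g gs ih =>
      simp only [List.foldl, renderAll]
      rw [ih]
      cases hb : g.2 <;>
        simp [String.join, String.append_assoc]

-- main loop invariant: A's fold from (acc ++ render cur, n) = acc ++ renderAll of B's groups from (cur, n)
theorem main_inv (sep : String) (ws : List String) :
    ∀ (cur : List String) (n : Int) (acc : String),
    (ws.foldl
      (fun (st : String × Int) word =>
        let curLineLen := st.2 + PySem.Str.len word
        let result := st.1 ++ word ++ " "
        if curLineLen > 30 then (result ++ sep, 0) else (result, curLineLen))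
      (acc ++ bRenderGroup cur, n)).1
    = acc ++ renderAll sep (bGroups ws cur n) := by
  induction ws with
  | nil =>
      intro cur n acc
      by_cases h : cur = []
      · simp [h, bGroups, renderAll, bRenderGroup, String.join]
      · simp [bGroups, h, renderAll, String.append_assoc]
  | cons w rest ih =>
      intro cur n acc
      simp only [List.foldl, bGroups]
      by_cases h : n + PySem.Str.len w > 30
      · rw [if_pos h, if_pos h]
        simp only [renderAll]
        have hnil : bRenderGroup ([] : List String) = "" := rfl
        have h2 := ih [] 0 (acc ++ bRenderGroup (cur ++ [w]) ++ sep)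
        rw [hnil] at h2
        simpa [renderGroup_append, String.append_assoc] using h2
      · rw [if_neg h, if_neg h]
        have := ih (cur ++ [w]) (n + PySem.Str.len w) acc
        rw [renderGroup_append] at this
        simpa [String.append_assoc] using this

-- ===== VERDICT (by name: the statement is the Claim_ definition above) =====
theorem makeAnnotation_spec : Claim_equal_makeAnnotation := by
  intro wa sep _
  show makeAnnotation wa sep = makeAnnotation_alt wa sep
  unfold makeAnnotation makeAnnotation_alt
  rw [foldl_out_eq]
  have := main_inv sep wa [] 0 ""
  simp only [bRenderGroup, List.map_nil, String.join, List.foldl] at this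
  simpa using this
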